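-- pv_equiv track=rewrite | github.com/numiareced/nlp-lab1 | lab1.py | calc_known
-- ===== SOURCE A (Python) =====
-- import collections
--
-- RARE_WORD_MAX_FREQ = 5
--
-- def calc_known(brown_words):
--     known_words = set([])
--     words_c = collections.defaultdict(int)
--
--     for sentence in brown_words:
--         for word in sentence:
--             words_c[word] += 1
--
--     for word, c in words_c.items():
--         if c > RARE_WORD_MAX_FREQ:
--             known_words.add(word)
--     return known_words
-- ===== SOURCE B (Python) =====
-- RARE_WORD_MAX_FREQ = 5
--
-- def calc_known(brown_words):
--     # Dict-free brute force: flatten once; for each distinct word (first time it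
--     # is seen) decide by scanning the flat list with list.count.
--     flat = [word for sentence in brown_words for word in sentence]
--     known_words = set()
--     seen = set()
--     for word in flat:
--         if word not in seen:
--             seen.add(word)
--             if flat.count(word) > RARE_WORD_MAX_FREQ:
--                 known_words.add(word)
--     return known_words
-- ===== Notes on version B (the rewrite author's own statement) =====
-- stated objective: alternative
-- what changed: Drops the frequency dictionary entirely: B flattens once and, for each distinct word at its first occurrence (tracked by a seen set), decides by a direct list.count scan over the flat list, letting set.add collect the answer, instead of A's defaultdict counting pass followed by a second items() filter pass.
import Mathlib
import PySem

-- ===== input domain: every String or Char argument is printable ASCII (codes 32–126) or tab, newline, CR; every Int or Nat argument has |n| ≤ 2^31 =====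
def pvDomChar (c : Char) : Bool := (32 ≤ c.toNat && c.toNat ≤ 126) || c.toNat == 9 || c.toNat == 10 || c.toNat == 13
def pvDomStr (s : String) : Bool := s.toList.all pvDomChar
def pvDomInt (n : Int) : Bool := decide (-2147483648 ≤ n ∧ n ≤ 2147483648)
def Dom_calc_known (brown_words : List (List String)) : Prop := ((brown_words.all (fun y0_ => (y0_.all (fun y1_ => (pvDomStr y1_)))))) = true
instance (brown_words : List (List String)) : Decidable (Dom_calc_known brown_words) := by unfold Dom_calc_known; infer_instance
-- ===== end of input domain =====

-- B drops the frequency dictionary: it flattens the sentences once and, for each distinct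
-- word (at its first occurrence, tracked by a seen set), decides by a direct list.count scan
-- over the flat list (count-scan brute force instead of hash counting; same results).

-- ===== PORT A =====
-- RARE_WORD_MAX_FREQ = 5 is inlined as the literal 5.
def calc_known (brown_words : List (List String)) : List String :=
  let words_c : PySem.Dict String Int :=
    brown_words.foldl (fun d sentence =>
      sentence.foldl (fun d word => d.modify word 0 (· + 1)) d) PySem.Dict.empty
  let known_words : PySem.Set String :=
    words_c.items.foldl (fun s p => if p.2 > 5 then PySem.Set.add s p.1 else s) PySem.Set.empty
  known_words

-- ===== PORT B =====
def calc_known_alt (brown_words : List (List String)) : List String :=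
  let flat : List String := brown_words.flatMap (fun sentence => sentence)
  (flat.foldl (fun st word =>
      if st.2.contains word then st
      else ((if (flat.count word : Int) > 5 then PySem.Set.add st.1 word else st.1),
            PySem.Set.add st.2 word))
    ((PySem.Set.empty : PySem.Set String), (PySem.Set.empty : PySem.Set String))).1

-- ===== PRECONDITION & SPEC =====
def Spec_calc_known (brown_words : List (List String)) (out : List String) : Prop := out = calc_known_alt brown_words
instance (brown_words : List (List String)) (out : List String) : Decidable (Spec_calc_known brown_words out) := by unfold Spec_calc_known; infer_instance

-- ===== CLAIM (what is proved, stated in full; the proofs are below) =====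
def Claim_equal_calc_known : Prop := ∀ (brown_words : List (List String)), Dom_calc_known brown_words → Spec_calc_known brown_words (calc_known brown_words)

-- ===== LEMMAS AND PROOFS =====

-- A's nested counting loop builds exactly Counter(flat).
theorem calc_known_counts (brown_words : List (List String)) :
    brown_words.foldl (fun d sentence =>
        sentence.foldl (fun d word => d.modify word 0 (· + 1)) d) PySem.Dict.empty
      = PySem.Dict.counter (brown_words.flatMap (fun sentence => sentence)) := by
  rw [PySem.Dict.counter_eq_foldl, List.flatMap_id', ← List.foldl_flatten]

-- filtering commutes with one Set.add
theorem filter_set_add (p : String → Bool) (acc : List String) (x : String) :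
    (PySem.Set.add acc x).filter p
      = if p x then PySem.Set.add (acc.filter p) x else acc.filter p := by
  by_cases hp : p x
  · by_cases hx : x ∈ acc
    · have hx' : x ∈ acc.filter p := List.mem_filter.mpr ⟨hx, hp⟩
      simp [PySem.Set.add, PySem.Set.contains, hx, hx', hp]
    · have hx' : x ∉ acc.filter p := fun h => hx (List.mem_filter.mp h).1
      simp [PySem.Set.add, PySem.Set.contains, hx, hx', hp]
  · by_cases hx : x ∈ acc <;>
      simp [PySem.Set.add, PySem.Set.contains, hx, hp, List.filter_append]

-- B's loop over (known_words, seen): seen accumulates the Set.add fold, known_words its p-filter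
theorem known_seen_fold (p : String → Bool) (l : List String) :
    ∀ seen : List String,
      l.foldl (fun st w =>
          if st.2.contains w then st
          else ((if p w then PySem.Set.add st.1 w else st.1), PySem.Set.add st.2 w))
        (seen.filter p, seen)
      = ((l.foldl PySem.Set.add seen).filter p, l.foldl PySem.Set.add seen) := by
  induction l with
  | nil => intro seen; rfl
  | cons w t ih =>
    intro seen
    simp only [List.contains_eq_mem] at ih ⊢
    rw [List.foldl_cons, List.foldl_cons]
    by_cases hw : w ∈ seen
    · have hadd : PySem.Set.add seen w = seen := by simp [PySem.Set.add, hw]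
      simp only [hw, decide_true, if_true, hadd]
      exact ih seen
    · simp only [hw, decide_false, Bool.false_eq_true, if_false]
      rw [← filter_set_add]
      exact ih (PySem.Set.add seen w)

-- ===== VERDICT (by name: the statement is the Claim_ definition above) =====
theorem calc_known_spec : Claim_equal_calc_known := by
  intro brown_words _
  unfold Spec_calc_known calc_known calc_known_alt
  simp only [calc_known_counts]
  set flat := brown_words.flatMap (fun sentence => sentence)
  rw [PySem.Dict.items_counter, PySem.List.foldl_ite_eq_foldl_filter,
      List.filter_map, List.foldl_map]
  have hB := known_seen_fold (fun word => decide ((flat.count word : Int) > 5)) flat []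
  simp only [List.filter_nil, decide_eq_true_eq] at hB
  have h2 : (List.foldl (fun st word =>
        if st.2.contains word then st
        else ((if (flat.count word : Int) > 5 then PySem.Set.add st.1 word else st.1),
              PySem.Set.add st.2 word))
        ((PySem.Set.empty : PySem.Set String), (PySem.Set.empty : PySem.Set String)) flat).1
      = (flat.foldl PySem.Set.add []).filter (fun word => decide ((flat.count word : Int) > 5)) :=
    congrArg Prod.fst hB
  rw [h2]
  have hfun : (fun (x : PySem.Set String) (y : String) =>
      PySem.Set.add x (y, (flat.count y : Int)).1) = PySem.Set.add := rfl
  have hpred : ((PySem.Set.ofList flat).filter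
        (((fun x : String × Int => decide (x.2 > 5)) ∘ fun k => (k, (flat.count k : Int)))))
      = (PySem.Set.ofList flat).filter (fun word => decide ((flat.count word : Int) > 5)) :=
    List.filter_congr (fun x _ => rfl)
  rw [hfun, hpred, ← PySem.Set.ofList_eq_foldl]
  exact PySem.Set.ofList_eq_self_of_nodup _ (List.Nodup.filter _ (PySem.Set.nodup_ofList flat))
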